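-- pv_equiv track=rewrite | github.com/KU-VGI/APDM | gen_arguments.py | get_arguments_eval
-- ===== SOURCE A (Python) =====
-- def check_exp(exp, exp_list, prefix="apdm", zfill=3):
--     return exp in [f"{prefix}{str(e).zfill(zfill)}" for e in exp_list]
--
-- def get_arguments_eval(exp):
--     default_args = {
--         "identifier": "sks",
--     }
--
--     args = default_args
--
--     if check_exp(exp, [1]):
--         args["data_dir"] = "data/person/set_A"
--         args["class_noun"] = "person"
--     elif check_exp(exp, [2]):
--         args["data_dir"] = "data/person2/set_A"
--         args["class_noun"] = "person"
--     elif check_exp(exp, [3]):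
--         args["data_dir"] = "data/person3/set_A"
--         args["class_noun"] = "person"
--     elif check_exp(exp, [4]):
--         args["data_dir"] = "data/person4/set_A"
--         args["class_noun"] = "person"
--     elif check_exp(exp, [5]):
--         args["data_dir"] = "data/dog"
--         args["class_noun"] = "dog"
--     elif check_exp(exp, [6]):
--         args["data_dir"] = "data/dog2"
--         args["class_noun"] = "dog"
--     elif check_exp(exp, [7]):
--         args["data_dir"] = "data/dog3"
--         args["class_noun"] = "dog"
--     elif check_exp(exp, [8]):
--         args["data_dir"] = "data/dog4"
--         args["class_noun"] = "dog"
--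
--     return " ".join([f"--{k} {v}" for k, v in args.items()])
-- ===== SOURCE B (Python) =====
-- _TABLE = {
--     "apdm001": ("data/person/set_A", "person"),
--     "apdm002": ("data/person2/set_A", "person"),
--     "apdm003": ("data/person3/set_A", "person"),
--     "apdm004": ("data/person4/set_A", "person"),
--     "apdm005": ("data/dog", "dog"),
--     "apdm006": ("data/dog2", "dog"),
--     "apdm007": ("data/dog3", "dog"),
--     "apdm008": ("data/dog4", "dog"),
-- }
--
-- def get_arguments_eval(exp):
--     out = "--identifier sks"
--     hit = _TABLE.get(exp)
--     if hit is not None: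
--         out += f" --data_dir {hit[0]} --class_noun {hit[1]}"
--     return out
-- ===== Notes on version B (the rewrite author's own statement) =====
-- stated objective: simpler
-- what changed: Replaces the 8-branch if/elif chain over check_exp (which rebuilds a formatted key list per branch) and the mutated dict with a single static key->(data_dir,class_noun) table lookup plus direct string construction.
import Mathlib
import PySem

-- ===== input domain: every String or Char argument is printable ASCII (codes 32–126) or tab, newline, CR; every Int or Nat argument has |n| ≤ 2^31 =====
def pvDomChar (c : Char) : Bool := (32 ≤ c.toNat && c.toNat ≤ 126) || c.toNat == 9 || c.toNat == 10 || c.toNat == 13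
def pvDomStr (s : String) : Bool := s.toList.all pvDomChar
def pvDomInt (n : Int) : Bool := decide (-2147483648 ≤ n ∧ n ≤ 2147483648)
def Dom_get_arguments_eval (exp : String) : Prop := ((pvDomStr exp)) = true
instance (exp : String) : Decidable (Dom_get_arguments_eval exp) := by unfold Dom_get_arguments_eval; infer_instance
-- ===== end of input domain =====

-- B replaces A's 8-branch if/elif chain over check_exp and the mutated dict with one
-- static key -> (data_dir, class_noun) table lookup and direct string construction (objective: simpler).

-- ===== PORT A =====
def check_exp (exp : String) (exp_list : List Int) (pre : String) (zfill : Int) : Bool :=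
  (exp_list.map (fun e => pre ++ PySem.Str.zfill (PySem.Int.toStr e) zfill)).contains exp

def get_arguments_eval (exp : String) : String :=
  let default_args : PySem.Dict String String := PySem.Dict.ofList [("identifier", "sks")]
  let args := default_args
  let args :=
    if check_exp exp [1] "apdm" 3 then
      (args.insert "data_dir" "data/person/set_A").insert "class_noun" "person"
    else if check_exp exp [2] "apdm" 3 then
      (args.insert "data_dir" "data/person2/set_A").insert "class_noun" "person"
    else if check_exp exp [3] "apdm" 3 then
      (args.insert "data_dir" "data/person3/set_A").insert "class_noun" "person"
    else if check_exp exp [4] "apdm" 3 then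
      (args.insert "data_dir" "data/person4/set_A").insert "class_noun" "person"
    else if check_exp exp [5] "apdm" 3 then
      (args.insert "data_dir" "data/dog").insert "class_noun" "dog"
    else if check_exp exp [6] "apdm" 3 then
      (args.insert "data_dir" "data/dog2").insert "class_noun" "dog"
    else if check_exp exp [7] "apdm" 3 then
      (args.insert "data_dir" "data/dog3").insert "class_noun" "dog"
    else if check_exp exp [8] "apdm" 3 then
      (args.insert "data_dir" "data/dog4").insert "class_noun" "dog"
    else args
  PySem.Str.join " " (args.items.map (fun kv => "--" ++ kv.1 ++ " " ++ kv.2))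

-- ===== PORT B =====
def pvTable : PySem.Dict String (String × String) :=
  PySem.Dict.ofList
    [ ("apdm001", ("data/person/set_A", "person"))
    , ("apdm002", ("data/person2/set_A", "person"))
    , ("apdm003", ("data/person3/set_A", "person"))
    , ("apdm004", ("data/person4/set_A", "person"))
    , ("apdm005", ("data/dog", "dog"))
    , ("apdm006", ("data/dog2", "dog"))
    , ("apdm007", ("data/dog3", "dog"))
    , ("apdm008", ("data/dog4", "dog")) ]

def get_arguments_eval_alt (exp : String) : String :=
  let out := "--identifier sks"
  match pvTable.get? exp with
  | some hit => out ++ " --data_dir " ++ hit.1 ++ " --class_noun " ++ hit.2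
  | none => out

-- ===== PRECONDITION & SPEC =====
def Spec_get_arguments_eval (exp : String) (out : String) : Prop := out = get_arguments_eval_alt exp
instance (exp : String) (out : String) : Decidable (Spec_get_arguments_eval exp out) := by unfold Spec_get_arguments_eval; infer_instance

-- ===== CLAIM (what is proved, stated in full; the proofs are below) =====
def Claim_equal_get_arguments_eval : Prop := ∀ (exp : String), Dom_get_arguments_eval exp → Spec_get_arguments_eval exp (get_arguments_eval exp)

-- ===== LEMMAS AND PROOFS =====

-- ===== VERDICT (by name: the statement is the Claim_ definition above) =====
theorem get_arguments_eval_spec : Claim_equal_get_arguments_eval := by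
  intro exp _
  unfold Spec_get_arguments_eval
  by_cases h1 : exp = "apdm001"; · subst h1; rfl
  by_cases h2 : exp = "apdm002"; · subst h2; rfl
  by_cases h3 : exp = "apdm003"; · subst h3; rfl
  by_cases h4 : exp = "apdm004"; · subst h4; rfl
  by_cases h5 : exp = "apdm005"; · subst h5; rfl
  by_cases h6 : exp = "apdm006"; · subst h6; rfl
  by_cases h7 : exp = "apdm007"; · subst h7; rfl
  by_cases h8 : exp = "apdm008"; · subst h8; rfl
  unfold get_arguments_eval get_arguments_eval_alt check_exp
  simp only [List.map, List.contains_eq_mem, List.mem_singleton,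
    show ("apdm" ++ PySem.Str.zfill (PySem.Int.toStr 1) 3 : String) = "apdm001" from by decide,
    show ("apdm" ++ PySem.Str.zfill (PySem.Int.toStr 2) 3 : String) = "apdm002" from by decide,
    show ("apdm" ++ PySem.Str.zfill (PySem.Int.toStr 3) 3 : String) = "apdm003" from by decide,
    show ("apdm" ++ PySem.Str.zfill (PySem.Int.toStr 4) 3 : String) = "apdm004" from by decide,
    show ("apdm" ++ PySem.Str.zfill (PySem.Int.toStr 5) 3 : String) = "apdm005" from by decide,
    show ("apdm" ++ PySem.Str.zfill (PySem.Int.toStr 6) 3 : String) = "apdm006" from by decide,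
    show ("apdm" ++ PySem.Str.zfill (PySem.Int.toStr 7) 3 : String) = "apdm007" from by decide,
    show ("apdm" ++ PySem.Str.zfill (PySem.Int.toStr 8) 3 : String) = "apdm008" from by decide,
    show pvTable = PySem.Dict.mk
      [ ("apdm001", ("data/person/set_A", "person")), ("apdm002", ("data/person2/set_A", "person")),
        ("apdm003", ("data/person3/set_A", "person")), ("apdm004", ("data/person4/set_A", "person")),
        ("apdm005", ("data/dog", "dog")), ("apdm006", ("data/dog2", "dog")),
        ("apdm007", ("data/dog3", "dog")), ("apdm008", ("data/dog4", "dog")) ] from rfl,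
    PySem.Dict.get?_mk_cons, beq_iff_eq, decide_eq_true_eq,
    if_neg h1, if_neg h2, if_neg h3, if_neg h4, if_neg h5, if_neg h6, if_neg h7, if_neg h8,
    if_neg (Ne.symm h1), if_neg (Ne.symm h2), if_neg (Ne.symm h3), if_neg (Ne.symm h4),
    if_neg (Ne.symm h5), if_neg (Ne.symm h6), if_neg (Ne.symm h7), if_neg (Ne.symm h8)]
  simp [PySem.Dict.get?]
  decide
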